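-- pv_equiv track=rewrite | github.com/Sapiofan/DQE_python_course | Collections_HW2/HW2.py | dict_flattening
-- ===== SOURCE A (Python) =====
-- def dict_flattening(list_of_dicts):
--     # list rather for performance. E.g. if we checked some value in one dict,
--     # there is no sense to return to it in further dicts
--     checked_items = []
--     # container for final values
--     flatten_dict = {}
--     # traverse through all dicts
--     for i in range(len(list_of_dicts)):
--         # traverse through all values in each dict
--         for key, value in list_of_dicts[i].items():
--             # if we checked this value, in previous dicts, just skip
--             if key in checked_items:
--                 continue
--             # variables to understand the maximum value and for renaming (if needed) the key
--             max_key = key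
--             max_value = value
--             # try to find key in other dicts
--             for j in range(len(list_of_dicts)):
--                 # key - value from other dicts
--                 dict = list_of_dicts[j]
--                 value_from_other_dict = dict.get(key)
--                 if i == j:
--                     continue
--                 # if there are duplicates in keys, but the first occurence is max, just rename key
--                 elif value_from_other_dict is not None and value_from_other_dict <= max_value:
--                     max_key = max_key + '_' + str(i + 1)
--                 # if there are duplicates and the first value isn't max, rename key and reassign max value
--                 elif value_from_other_dict is not None and value_from_other_dict > max_value:
--                     max_value = value_from_other_dict
--                     max_key = max_key + '_' + str(j + 1)
--             checked_items.append(key)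
--             # add maximum value and respective key to container
--             flatten_dict[max_key] = max_value
--
--     return flatten_dict
-- ===== SOURCE B (Python) =====
-- def dict_flattening(list_of_dicts):
--     # Single streaming pass: per key keep [first_index, renamed_key, running_max];
--     # each later occurrence updates the state in O(1), so total work is linear
--     # in the number of entries (A rescans every dict for every distinct key).
--     states = {}
--     for j, d in enumerate(list_of_dicts):
--         for key, value in d.items():
--             st = states.get(key)
--             if st is None:
--                 states[key] = [j, key, value]
--             elif value <= st[2]:
--                 st[1] += '_' + str(st[0] + 1)
--             else:
--                 st[1] += '_' + str(j + 1)
--                 st[2] = value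
--     return {name: best for _, name, best in states.values()}
-- ===== Notes on version B (the rewrite author's own statement) =====
-- stated objective: faster
-- what changed: Replaced A's rescan of every dict for each distinct key (plus a linear 'checked' list membership test) by one streaming pass that keeps, per key in a dict, the state [first index, renamed key, running max] and updates it in O(1) per occurrence.
import Mathlib
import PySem

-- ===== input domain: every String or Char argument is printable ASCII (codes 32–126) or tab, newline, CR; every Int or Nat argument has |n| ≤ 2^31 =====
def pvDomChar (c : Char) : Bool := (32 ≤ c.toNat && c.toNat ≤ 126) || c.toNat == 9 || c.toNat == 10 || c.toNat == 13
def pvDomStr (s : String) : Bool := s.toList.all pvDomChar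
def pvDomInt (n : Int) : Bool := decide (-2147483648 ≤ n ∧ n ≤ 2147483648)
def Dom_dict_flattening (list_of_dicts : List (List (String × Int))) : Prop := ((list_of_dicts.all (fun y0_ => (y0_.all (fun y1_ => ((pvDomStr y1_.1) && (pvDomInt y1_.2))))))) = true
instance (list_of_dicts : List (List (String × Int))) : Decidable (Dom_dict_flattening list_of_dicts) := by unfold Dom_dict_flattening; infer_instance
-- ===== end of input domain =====

-- B replaces A's per-key rescan of every dict by one streaming pass keeping a per-key
-- state (first index, renamed key, running max); equivalence of the RETURN values is proved.

-- ===== PORT A =====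
-- inner `for j in range(len(list_of_dicts))` loop of A
def aScan (ds : List (PySem.Dict String Int)) (i : Int) (key : String) (value : Int) : String × Int :=
  (PySem.List.pyRange 0 (PySem.List.len ds)).foldl
    (fun st j =>
      let dict := PySem.List.pyGetD ds j PySem.Dict.empty
      let v? := dict.get? key
      if i = j then st
      else
        match v? with
        | some v =>
            if v ≤ st.2 then (st.1 ++ "_" ++ PySem.Int.toStr (i + 1), st.2)
            else (st.1 ++ "_" ++ PySem.Int.toStr (j + 1), v)
        | none => st)
    (key, value)

def dict_flattening (list_of_dicts : List (List (String × Int))) : List (String × Int) :=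
  let ds := list_of_dicts.map PySem.Dict.ofList
  let final :=
    (PySem.List.pyRange 0 (PySem.List.len list_of_dicts)).foldl
      (fun (st : List String × PySem.Dict String Int) i =>
        let d := PySem.List.pyGetD ds i PySem.Dict.empty
        d.items.foldl
          (fun st p =>
            if p.1 ∈ st.1 then st
            else
              let mk := aScan ds i p.1 p.2
              (st.1 ++ [p.1], st.2.insert mk.1 mk.2))
          st)
      ([], PySem.Dict.empty)
  final.2.items

-- ===== PORT B =====
-- one O(1) update of the per-key state [first index, renamed key, running max]
def altStep (states : PySem.Dict String (Int × String × Int)) (j : Int) (p : String × Int) :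
    PySem.Dict String (Int × String × Int) :=
  match states.get? p.1 with
  | none => states.insert p.1 (j, p.1, p.2)
  | some st =>
      if p.2 ≤ st.2.2 then
        states.insert p.1 (st.1, st.2.1 ++ "_" ++ PySem.Int.toStr (st.1 + 1), st.2.2)
      else
        states.insert p.1 (st.1, st.2.1 ++ "_" ++ PySem.Int.toStr (j + 1), p.2)

def dict_flattening_alt (list_of_dicts : List (List (String × Int))) : List (String × Int) :=
  let ds := list_of_dicts.map PySem.Dict.ofList
  let states :=
    (PySem.List.enumerate ds).foldl
      (fun st jd => jd.2.items.foldl (fun st p => altStep st jd.1 p) st)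
      PySem.Dict.empty
  (states.values.foldl
      (fun (r : PySem.Dict String Int) v => r.insert v.2.1 v.2.2)
      PySem.Dict.empty).items

-- ===== PRECONDITION & SPEC =====
def Spec_dict_flattening (list_of_dicts : List (List (String × Int))) (out : List (String × Int)) : Prop := out = dict_flattening_alt list_of_dicts
instance (list_of_dicts : List (List (String × Int))) (out : List (String × Int)) : Decidable (Spec_dict_flattening list_of_dicts out) := by unfold Spec_dict_flattening; infer_instance

-- ===== CLAIM (what is proved, stated in full; the proofs are below) =====
def Claim_equal_dict_flattening : Prop := ∀ (list_of_dicts : List (List (String × Int))), Dom_dict_flattening list_of_dicts → Spec_dict_flattening list_of_dicts (dict_flattening list_of_dicts)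

-- ===== LEMMAS AND PROOFS =====

-- the common "per occurrence" step both programs perform on the state (first, name, best)
def pvStep (t : Int × String × Int) (jv : Int × Int) : Int × String × Int :=
  if jv.2 ≤ t.2.2 then (t.1, t.2.1 ++ "_" ++ PySem.Int.toStr (t.1 + 1), t.2.2)
  else (t.1, t.2.1 ++ "_" ++ PySem.Int.toStr (jv.1 + 1), jv.2)

-- occurrences (index, value) of key k among the enumerated dicts
def pvOccs (L : List (Int × PySem.Dict String Int)) (k : String) : List (Int × Int) :=
  L.filterMap (fun jd => (jd.2.get? k).map (fun v => (jd.1, v)))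

-- the final state of key k, if it occurs at all
def pvRes (L : List (Int × PySem.Dict String Int)) (k : String) : Option (Int × String × Int) :=
  match pvOccs L k with
  | [] => none
  | o :: rest => some (rest.foldl pvStep (o.1, k, o.2))

def pvG (L : List (Int × PySem.Dict String Int)) (k : String) : String × Int :=
  match pvRes L k with
  | some t => (t.2.1, t.2.2)
  | none => (k, 0)

-- distinct keys of ks not in ch, in first-occurrence order
def pvNew (ks : List String) (ch : List String) : List String :=
  match ks with
  | [] => []
  | k :: t => if k ∈ ch then pvNew t ch else k :: pvNew t (ch ++ [k])

-- ---- generic bridge: a range(len(xs)) loop reading xs[j] is a loop over enumerate(xs) ----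
lemma foldl_pyRange_enum {α β : Type} (xs : List α) (dflt : α) (f : β → Int → α → β) :
    ∀ (k : Nat) (init : β), k ≤ xs.length →
      (PySem.List.pyRange (k : Int) (PySem.List.len xs)).foldl
          (fun acc j => f acc j (PySem.List.pyGetD xs j dflt)) init
      = (PySem.List.enumerate (xs.drop k) (k : Int)).foldl (fun acc p => f acc p.1 p.2) init := by
  intro k init hk
  induction h : xs.length - k generalizing k init with
  | zero =>
      have hke : k = xs.length := by omega
      subst hke
      rw [List.drop_length, PySem.List.pyRange_one_eq_nil (by simp [PySem.List.len])]
      rfl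
  | succ n ih =>
      have hklt : k < xs.length := by omega
      rw [PySem.List.pyRange_one_cons (by simp only [PySem.List.len]; exact_mod_cast hklt),
        List.foldl_cons,
        List.drop_eq_getElem_cons hklt,
        show PySem.List.enumerate (xs[k] :: xs.drop (k + 1)) (k : Int)
          = ((k : Int), xs[k]) :: PySem.List.enumerate (xs.drop (k + 1)) ((k : Int) + 1) from rfl,
        List.foldl_cons,
        PySem.List.pyGetD_eq_getElem xs dflt (by positivity) (by exact_mod_cast hklt)]
      simp only [Int.toNat_natCast]
      have := ih (k + 1) (f init (k : Int) xs[k]) (by omega) (by omega)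
      rw [show ((k : Int) + 1) = ((k + 1 : Nat) : Int) by push_cast; ring] at *
      exact this

-- ---- facts about pvNew ----
lemma pvNew_append (l1 l2 ch : List String) :
    pvNew (l1 ++ l2) ch = pvNew l1 ch ++ pvNew l2 (ch ++ pvNew l1 ch) := by
  induction l1 generalizing ch with
  | nil => simp [pvNew]
  | cons k t ih =>
      by_cases hk : k ∈ ch
      · simp [pvNew, hk, ih]
      · simp only [List.cons_append, pvNew, hk, if_false, ih (ch ++ [k])]
        simp [List.append_assoc]

lemma mem_pvNew {k : String} : ∀ (ks ch : List String), k ∈ pvNew ks ch ↔ k ∈ ks ∧ k ∉ ch := by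
  intro ks
  induction ks with
  | nil => simp [pvNew]
  | cons x t ih =>
      intro ch
      by_cases hx : x ∈ ch
      · rw [pvNew, if_pos hx, ih]
        simp only [List.mem_cons]
        constructor
        · rintro ⟨h1, h2⟩; exact ⟨Or.inr h1, h2⟩
        · rintro ⟨rfl | h1, h2⟩
          · exact absurd hx h2
          · exact ⟨h1, h2⟩
      · rw [pvNew, if_neg hx]
        by_cases hkx : k = x
        · subst hkx; simp [hx]
        · simp only [List.mem_cons, hkx, false_or, ih]
          simp [hkx]

lemma update_eq_append_pvNew : ∀ (ks ch : List String), PySem.Set.update ch ks = ch ++ pvNew ks ch := by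
  intro ks
  induction ks with
  | nil => intro ch; simp [pvNew, PySem.Set.update]
  | cons x t ih =>
      intro ch
      rw [PySem.Set.update_cons, pvNew]
      by_cases hx : x ∈ ch
      · have : PySem.Set.add ch x = ch := by
          simp [PySem.Set.add, PySem.Set.contains, hx]
        rw [this, if_pos hx, ih]
      · have : PySem.Set.add ch x = ch ++ [x] := by
          simp [PySem.Set.add, PySem.Set.contains, hx]
        rw [this, if_neg hx, ih]
        simp [List.append_assoc]

-- ---- occurrence-list facts ----
lemma pvOccs_cons (jd : Int × PySem.Dict String Int) (L : List (Int × PySem.Dict String Int)) (k : String) :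
    pvOccs (jd :: L) k =
      match jd.2.get? k with
      | some v => (jd.1, v) :: pvOccs L k
      | none => pvOccs L k := by
  cases h : jd.2.get? k <;> simp [pvOccs, h]

lemma pvOccs_fst_sublist (L : List (Int × PySem.Dict String Int)) (k : String) :
    ((pvOccs L k).map Prod.fst).Sublist (L.map Prod.fst) := by
  induction L with
  | nil => simp [pvOccs]
  | cons jd t ih =>
      rw [pvOccs_cons]
      cases h : jd.2.get? k with
      | none => simpa using ih.cons jd.1
      | some v => simpa using ih.cons₂ jd.1

lemma mem_enumerate_fst_le {α : Type} : ∀ (xs : List α) (s : Int) (p : Int × α),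
    p ∈ PySem.List.enumerate xs s → s ≤ p.1 := by
  intro xs
  induction xs with
  | nil => intro s p h; simp [PySem.List.enumerate] at h
  | cons x t ih =>
      intro s p h
      rw [show PySem.List.enumerate (x :: t) s = (s, x) :: PySem.List.enumerate t (s + 1) from rfl] at h
      rcases List.mem_cons.mp h with h | h
      · simp [h]
      · have := ih (s + 1) p h; omega

lemma enumerate_fst_pairwise {α : Type} : ∀ (xs : List α) (s : Int),
    ((PySem.List.enumerate xs s).map Prod.fst).Pairwise (· < ·) := by
  intro xs
  induction xs with
  | nil => intro s; simp [PySem.List.enumerate]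
  | cons x t ih =>
      intro s
      rw [show PySem.List.enumerate (x :: t) s = (s, x) :: PySem.List.enumerate t (s + 1) from rfl]
      simp only [List.map_cons, List.pairwise_cons]
      refine ⟨?_, ih (s + 1)⟩
      intro y hy
      rcases List.mem_map.mp hy with ⟨p, hp, rfl⟩
      have := mem_enumerate_fst_le t (s + 1) p hp; omega

lemma aScan_foldl (i : Int) (k : String) :
    ∀ (L : List (Int × PySem.Dict String Int)) (t : String × Int),
      L.foldl
        (fun st jd =>
          let v? := jd.2.get? k
          if i = jd.1 then st
          else
            match v? with
            | some v =>
                if v ≤ st.2 then (st.1 ++ "_" ++ PySem.Int.toStr (i + 1), st.2)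
                else (st.1 ++ "_" ++ PySem.Int.toStr (jd.1 + 1), v)
            | none => st) t
      = (let r := ((pvOccs L k).filter (fun jv => jv.1 ≠ i)).foldl pvStep (i, t.1, t.2)
         (r.2.1, r.2.2)) := by
  intro L
  induction L with
  | nil => intro t; simp [pvOccs]
  | cons jd L ih =>
      intro t
      rw [List.foldl_cons, pvOccs_cons]
      by_cases hij : i = jd.1
      · cases hv : jd.2.get? k with
        | none => simpa [hij, hv] using ih t
        | some v =>
            simp only [hij, if_true, List.filter_cons]
            simpa [hij] using ih t
      · cases hv : jd.2.get? k with
        | none => simpa [hij, hv] using ih t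
        | some v =>
            simp only [hij, ite_false, List.filter_cons]
            have hkeep : decide ((jd.1, v).1 ≠ i) = true := by simp; exact fun h => hij h.symm
            rw [hkeep]
            simp only [if_true, List.foldl_cons]
            by_cases hle : v ≤ t.2
            · rw [show pvStep (i, t.1, t.2) (jd.1, v)
                  = (i, t.1 ++ "_" ++ PySem.Int.toStr (i + 1), t.2) by simp [pvStep, hle]]
              simpa [hle] using ih (t.1 ++ "_" ++ PySem.Int.toStr (i + 1), t.2)
            · rw [show pvStep (i, t.1, t.2) (jd.1, v)
                  = (i, t.1 ++ "_" ++ PySem.Int.toStr (jd.1 + 1), v) by simp [pvStep, hle]]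
              simpa [hle] using ih (t.1 ++ "_" ++ PySem.Int.toStr (jd.1 + 1), v)

lemma aScan_eq_pvG (ds : List (PySem.Dict String Int)) (k : String) (j v : Int)
    (h : (pvOccs (PySem.List.enumerate ds) k).head? = some (j, v)) :
    aScan ds j k v = pvG (PySem.List.enumerate ds) k := by
  obtain ⟨o, rest, hocc⟩ : ∃ o rest, pvOccs (PySem.List.enumerate ds) k = o :: rest := by
    cases hc : pvOccs (PySem.List.enumerate ds) k with
    | nil => rw [hc] at h; simp at h
    | cons o rest => exact ⟨o, rest, rfl⟩
  have ho : o = (j, v) := by rw [hocc] at h; simpa using h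
  subst ho
  have hpw : ((pvOccs (PySem.List.enumerate ds) k).map Prod.fst).Pairwise (· < ·) :=
    List.Pairwise.sublist (pvOccs_fst_sublist (PySem.List.enumerate ds) k) (enumerate_fst_pairwise ds 0)
  rw [hocc] at hpw
  simp only [List.map_cons, List.pairwise_cons] at hpw
  have hrest : rest.filter (fun jv => !decide (jv.1 = j)) = rest := by
    apply List.filter_eq_self.mpr
    intro a ha
    have := hpw.1 a.1 (List.mem_map.mpr ⟨a, ha, rfl⟩)
    simp only [Bool.not_eq_true', decide_eq_false_iff_not]
    omega
  have h1 : aScan ds j k v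
      = (PySem.List.enumerate ds).foldl (fun st jd =>
          let v? := jd.2.get? k
          if j = jd.1 then st
          else match v? with
            | some v2 => if v2 ≤ st.2 then (st.1 ++ "_" ++ PySem.Int.toStr (j + 1), st.2)
                         else (st.1 ++ "_" ++ PySem.Int.toStr (jd.1 + 1), v2)
            | none => st) (k, v) := by
    unfold aScan
    have := foldl_pyRange_enum ds PySem.Dict.empty
      (fun st jj dict =>
        let v? := dict.get? k
        if j = jj then st
        else match v? with
          | some v2 => if v2 ≤ st.2 then (st.1 ++ "_" ++ PySem.Int.toStr (j + 1), st.2)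
                       else (st.1 ++ "_" ++ PySem.Int.toStr (jj + 1), v2)
          | none => st) 0 (k, v) (Nat.zero_le _)
    simpa using this
  rw [h1, aScan_foldl j k (PySem.List.enumerate ds) (k, v)]
  unfold pvG pvRes
  rw [hocc]
  simp only [List.filter_cons, decide_not]
  rw [if_neg (by simp), hrest]

-- ---- A's outer loop ----
lemma aDict_foldl (F : String → Int → String × Int) (g : String → String × Int) :
    ∀ (l : List (String × Int)) (ch : List String) (fl : PySem.Dict String Int),
      (∀ p ∈ l, p.1 ∉ ch → F p.1 p.2 = g p.1) →
      l.foldl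
        (fun (st : List String × PySem.Dict String Int) p =>
          if p.1 ∈ st.1 then st
          else
            let mk := F p.1 p.2
            (st.1 ++ [p.1], st.2.insert mk.1 mk.2)) (ch, fl)
      = (ch ++ pvNew (l.map Prod.fst) ch,
         (pvNew (l.map Prod.fst) ch).foldl (fun fl k => fl.insert (g k).1 (g k).2) fl) := by
  intro l
  induction l with
  | nil => intro ch fl _; simp [pvNew]
  | cons p t ih =>
      intro ch fl Hd
      rw [List.foldl_cons]
      by_cases hp : p.1 ∈ ch
      · have hstep : (if p.1 ∈ (ch, fl).1 then (ch, fl)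
            else ((ch, fl).1 ++ [p.1], (ch, fl).2.insert (F p.1 p.2).1 (F p.1 p.2).2)) = (ch, fl) := by
          simp [hp]
        rw [hstep, ih ch fl (fun q hq hqc => Hd q (List.mem_cons_of_mem _ hq) hqc)]
        simp [pvNew, hp]
      · have hF := Hd p (List.mem_cons_self) hp
        have hstep : (if p.1 ∈ (ch, fl).1 then (ch, fl)
            else ((ch, fl).1 ++ [p.1], (ch, fl).2.insert (F p.1 p.2).1 (F p.1 p.2).2))
            = (ch ++ [p.1], fl.insert (g p.1).1 (g p.1).2) := by
          simp [hp, hF]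
        rw [hstep, ih (ch ++ [p.1]) _ ?_]
        · simp only [List.map_cons, pvNew, hp, ite_false, List.foldl_cons]
          simp [List.append_assoc]
        · intro q hq hqc
          have : q.1 ∉ ch := by
            intro hc; exact hqc (List.mem_append_left _ hc)
          exact Hd q (List.mem_cons_of_mem _ hq) this

lemma aMain (ds : List (PySem.Dict String Int)) :
    ∀ (L : List (Int × PySem.Dict String Int)) (ch : List String) (fl : PySem.Dict String Int),
      (∀ jd ∈ L, jd.2.keys.Nodup) →
      (∀ k j v, (pvOccs L k).head? = some (j, v) → k ∉ ch →
        aScan ds j k v = pvG (PySem.List.enumerate ds) k) →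
      L.foldl
        (fun (st : List String × PySem.Dict String Int) jd =>
          jd.2.items.foldl
            (fun st p =>
              if p.1 ∈ st.1 then st
              else
                let mk := aScan ds jd.1 p.1 p.2
                (st.1 ++ [p.1], st.2.insert mk.1 mk.2)) st) (ch, fl)
      = (ch ++ pvNew (L.flatMap (fun jd => jd.2.keys)) ch,
         (pvNew (L.flatMap (fun jd => jd.2.keys)) ch).foldl
           (fun fl k => fl.insert (pvG (PySem.List.enumerate ds) k).1
                                  (pvG (PySem.List.enumerate ds) k).2) fl) := by
  intro L
  induction L with
  | nil => intro ch fl _ _; simp [pvNew]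
  | cons jd rest ih =>
      intro ch fl hnd H
      have hkeys : ∀ (d : PySem.Dict String Int), d.keys = d.items.map Prod.fst := fun _ => rfl
      rw [List.foldl_cons,
        aDict_foldl (fun k v => aScan ds jd.1 k v) (pvG (PySem.List.enumerate ds)) jd.2.items ch fl ?_]
      · rw [ih (ch ++ pvNew (jd.2.items.map Prod.fst) ch) _ (fun x hx => hnd x (List.mem_cons_of_mem _ hx)) ?_]
        · rw [List.flatMap_cons, hkeys jd.2, pvNew_append, List.foldl_append]
          simp [List.append_assoc]
        · intro k j v hh hkc
          simp only [List.mem_append, mem_pvNew, not_or, not_and, not_not] at hkc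
          have hch : k ∉ ch := hkc.1
          have hkkeys : k ∉ jd.2.keys := by
            rw [hkeys jd.2]; intro hmem; exact hch (hkc.2 hmem)
          have hnone : jd.2.get? k = none := (PySem.Dict.get?_eq_none_iff_not_mem_keys jd.2 k).mpr hkkeys
          apply H k j v _ hch
          rw [pvOccs_cons, hnone]
          exact hh
      · intro p hp hpch
        have hsome : jd.2.get? p.1 = some p.2 := by
          apply PySem.Dict.get?_of_mem_items (d := jd.2) (by simpa using hp) (hnd jd List.mem_cons_self)
        apply H p.1 jd.1 p.2 _ hpch
        rw [pvOccs_cons, hsome]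
        rfl

-- ---- B's state dict ----
lemma altStep_eq_insert (st : PySem.Dict String (Int × String × Int)) (j : Int) (p : String × Int) :
    altStep st j p = st.insert p.1
      (match st.get? p.1 with
       | none => (j, p.1, p.2)
       | some t => pvStep t (j, p.2)) := by
  unfold altStep pvStep
  cases h : st.get? p.1 with
  | none => rfl
  | some t => dsimp only; split <;> rfl

lemma altStep_get? (st : PySem.Dict String (Int × String × Int)) (j : Int) (p : String × Int) (k : String) :
    (altStep st j p).get? k =
      if k = p.1 then
        some (match st.get? p.1 with
              | none => (j, p.1, p.2)
              | some t => pvStep t (j, p.2))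
      else st.get? k := by
  rw [altStep_eq_insert, PySem.Dict.get?_insert]

lemma foldB_get?_untouched (j : Int) (k : String) :
    ∀ (l : List (String × Int)) (st : PySem.Dict String (Int × String × Int)),
      (∀ q ∈ l, q.1 ≠ k) →
      (l.foldl (fun st p => altStep st j p) st).get? k = st.get? k := by
  intro l
  induction l with
  | nil => intro st _; rfl
  | cons p t ih =>
      intro st h
      rw [List.foldl_cons, ih _ (fun q hq => h q (List.mem_cons_of_mem _ hq)), altStep_get?,
        if_neg (fun he => h p List.mem_cons_self he.symm)]

lemma bDict_get? (j : Int) (k : String) :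
    ∀ (l : List (String × Int)), (l.map Prod.fst).Nodup →
      ∀ (st : PySem.Dict String (Int × String × Int)),
      (l.foldl (fun st p => altStep st j p) st).get? k =
        match (l.find? (fun p => p.1 == k)).map Prod.snd with
        | none => st.get? k
        | some v =>
            some (match st.get? k with
                  | none => (j, k, v)
                  | some t => pvStep t (j, v)) := by
  intro l
  induction l with
  | nil => intro _ st; simp
  | cons p t ih =>
      intro hnd st
      simp only [List.map_cons, List.nodup_cons] at hnd
      rw [List.foldl_cons]
      by_cases hk : p.1 = k
      · subst hk
        have hknot : ∀ q ∈ t, q.1 ≠ p.1 := by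
          intro q hq he
          exact hnd.1 (he ▸ List.mem_map.mpr ⟨q, hq, rfl⟩)
        rw [foldB_get?_untouched _ _ t _ hknot, altStep_get?, if_pos rfl,
          List.find?_cons_of_pos (by simp)]
        rfl
      · rw [ih hnd.2 _, List.find?_cons_of_neg (by simpa using hk), altStep_get?,
          if_neg (fun he => hk he.symm)]

lemma bMain_get? (k : String) :
    ∀ (L : List (Int × PySem.Dict String Int)), (∀ jd ∈ L, jd.2.keys.Nodup) →
      ∀ (st : PySem.Dict String (Int × String × Int)),
      (L.foldl (fun st jd => jd.2.items.foldl (fun st p => altStep st jd.1 p) st) st).get? k =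
        match st.get? k with
        | some t => some ((pvOccs L k).foldl pvStep t)
        | none => pvRes L k := by
  intro L
  induction L with
  | nil => intro _ st; cases hst : st.get? k <;> simp [pvOccs, pvRes, hst]
  | cons jd rest ih =>
      intro hnd st
      have hnd' : ∀ x ∈ rest, x.2.keys.Nodup := fun x hx => hnd x (List.mem_cons_of_mem _ hx)
      rw [List.foldl_cons, ih hnd' _]
      have hget : jd.2.get? k = (jd.2.items.find? (fun p => p.1 == k)).map Prod.snd := rfl
      have hd := bDict_get? jd.1 k jd.2.items (hnd jd List.mem_cons_self) st
      rw [← hget] at hd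
      rw [hd, pvOccs_cons]
      cases hv : jd.2.get? k with
      | none =>
          have hres : pvRes (jd :: rest) k = pvRes rest k := by
            unfold pvRes; rw [pvOccs_cons, hv]
          cases hst : st.get? k <;> simp [hres]
      | some v =>
          have hres : pvRes (jd :: rest) k
              = some ((pvOccs rest k).foldl pvStep (jd.1, k, v)) := by
            unfold pvRes; rw [pvOccs_cons, hv]
          cases hst : st.get? k <;> simp [hres]

lemma bMain_keys :
    ∀ (L : List (Int × PySem.Dict String Int)) (st : PySem.Dict String (Int × String × Int)),
      (L.foldl (fun st jd => jd.2.items.foldl (fun st p => altStep st jd.1 p) st) st).keys =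
        PySem.Set.update st.keys (L.flatMap (fun jd => jd.2.keys)) ∧
      (st.keys.Nodup →
        (L.foldl (fun st jd => jd.2.items.foldl (fun st p => altStep st jd.1 p) st) st).keys.Nodup) := by
  have hfun : ∀ (j : Int), (fun (st : PySem.Dict String (Int × String × Int)) (p : String × Int) => altStep st j p)
      = (fun st p => st.insert p.1
          (match st.get? p.1 with
           | none => (j, p.1, p.2)
           | some t => pvStep t (j, p.2))) := by
    intro j; funext st p; exact altStep_eq_insert st j p
  have hone_keys : ∀ (j : Int) (d : PySem.Dict String Int) (st : PySem.Dict String (Int × String × Int)),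
      (d.items.foldl (fun st p => altStep st j p) st).keys = PySem.Set.update st.keys d.keys := by
    intro j d st
    rw [hfun j]
    exact PySem.Dict.keys_foldl_insert_key d.items Prod.fst _ st
  have hone_nodup : ∀ (j : Int) (d : PySem.Dict String Int) (st : PySem.Dict String (Int × String × Int)),
      st.keys.Nodup → (d.items.foldl (fun st p => altStep st j p) st).keys.Nodup := by
    intro j d st h
    rw [hfun j]
    exact PySem.Dict.nodup_keys_foldl_insert_key d.items Prod.fst _ st h
  intro L
  induction L with
  | nil => intro st; exact ⟨by simp, fun h => h⟩
  | cons jd rest ih =>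
      intro st
      rw [List.foldl_cons]
      constructor
      · rw [(ih _).1, hone_keys, List.flatMap_cons, PySem.Set.update_append]
      · intro h
        exact (ih _).2 (hone_nodup _ _ _ h)

lemma mem_enumerate_snd_mem {α : Type} : ∀ (xs : List α) (s : Int) (p : Int × α),
    p ∈ PySem.List.enumerate xs s → p.2 ∈ xs := by
  intro xs
  induction xs with
  | nil => intro s p h; simp [PySem.List.enumerate] at h
  | cons x t ih =>
      intro s p h
      rw [show PySem.List.enumerate (x :: t) s = (s, x) :: PySem.List.enumerate t (s + 1) from rfl] at h
      rcases List.mem_cons.mp h with h | h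
      · subst h; simp
      · exact List.mem_cons_of_mem _ (ih (s + 1) p h)

-- ===== VERDICT (by name: the statement is the Claim_ definition above) =====
theorem dict_flattening_spec : Claim_equal_dict_flattening := by
  unfold Claim_equal_dict_flattening Spec_dict_flattening
  intro lod _
  have hnd : ∀ jd ∈ PySem.List.enumerate (lod.map PySem.Dict.ofList),
      jd.2.keys.Nodup := by
    intro jd hjd
    have hmem : jd.2 ∈ lod.map PySem.Dict.ofList := mem_enumerate_snd_mem _ 0 jd hjd
    obtain ⟨l, -, hl⟩ := List.mem_map.mp hmem
    rw [← hl]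
    exact PySem.Dict.nodup_keys_ofList l
  have hA : dict_flattening lod
      = ((pvNew ((PySem.List.enumerate (lod.map PySem.Dict.ofList)).flatMap
            (fun jd => jd.2.keys)) []).foldl
          (fun fl k =>
            fl.insert (pvG (PySem.List.enumerate (lod.map PySem.Dict.ofList)) k).1
                      (pvG (PySem.List.enumerate (lod.map PySem.Dict.ofList)) k).2)
          PySem.Dict.empty).items := by
    unfold dict_flattening
    dsimp only
    have hlen : PySem.List.len lod = PySem.List.len (lod.map PySem.Dict.ofList) := by
      simp [PySem.List.len]
    rw [hlen]
    have hbridge := foldl_pyRange_enum (lod.map PySem.Dict.ofList) PySem.Dict.empty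
      (fun (st : List String × PySem.Dict String Int) i d =>
        d.items.foldl
          (fun st p =>
            if p.1 ∈ st.1 then st
            else
              let mk := aScan (lod.map PySem.Dict.ofList) i p.1 p.2
              (st.1 ++ [p.1], st.2.insert mk.1 mk.2)) st)
      0 ([], PySem.Dict.empty) (Nat.zero_le _)
    simp only [Nat.cast_zero, List.drop_zero] at hbridge
    rw [hbridge,
      aMain (lod.map PySem.Dict.ofList) (PySem.List.enumerate (lod.map PySem.Dict.ofList))
        [] PySem.Dict.empty hnd
        (fun k j v hh _ => aScan_eq_pvG (lod.map PySem.Dict.ofList) k j v hh)]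
  have hB : dict_flattening_alt lod
      = ((pvNew ((PySem.List.enumerate (lod.map PySem.Dict.ofList)).flatMap
            (fun jd => jd.2.keys)) []).foldl
          (fun fl k =>
            fl.insert (pvG (PySem.List.enumerate (lod.map PySem.Dict.ofList)) k).1
                      (pvG (PySem.List.enumerate (lod.map PySem.Dict.ofList)) k).2)
          PySem.Dict.empty).items := by
    unfold dict_flattening_alt
    dsimp only
    have hkeys := (bMain_keys (PySem.List.enumerate (lod.map PySem.Dict.ofList)) PySem.Dict.empty).1
    have hnodup := (bMain_keys (PySem.List.enumerate (lod.map PySem.Dict.ofList)) PySem.Dict.empty).2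
      (by simp [PySem.Dict.empty])
    have hkeys' : (List.foldl (fun st jd => jd.2.items.foldl (fun st p => altStep st jd.1 p) st)
        PySem.Dict.empty (PySem.List.enumerate (lod.map PySem.Dict.ofList))).keys
        = pvNew ((PySem.List.enumerate (lod.map PySem.Dict.ofList)).flatMap (fun jd => jd.2.keys)) [] := by
      rw [hkeys]
      have : (PySem.Dict.empty : PySem.Dict String (Int × String × Int)).keys = ([] : List String) := rfl
      rw [this, update_eq_append_pvNew]
      simp
    rw [PySem.Dict.values_eq_map_keys _ hnodup (0, "", 0), List.foldl_map, hkeys']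
    congr 1
    apply PySem.List.foldl_congr_mem
    intro acc k hk
    have hkFL : k ∈ (PySem.List.enumerate (lod.map PySem.Dict.ofList)).flatMap (fun jd => jd.2.keys) :=
      ((mem_pvNew _ _).mp hk).1
    obtain ⟨jd, hjd, hkjd⟩ := List.mem_flatMap.mp hkFL
    have hne : pvOccs (PySem.List.enumerate (lod.map PySem.Dict.ofList)) k ≠ [] := by
      intro hnil
      have := List.filterMap_eq_nil_iff.mp hnil jd hjd
      rcases hsome : jd.2.get? k with _ | v
      · exact (PySem.Dict.get?_eq_none_iff_not_mem_keys jd.2 k).mp hsome hkjd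
      · rw [hsome] at this; simp at this
    obtain ⟨o, rest, hocc⟩ : ∃ o rest,
        pvOccs (PySem.List.enumerate (lod.map PySem.Dict.ofList)) k = o :: rest := by
      cases hc : pvOccs (PySem.List.enumerate (lod.map PySem.Dict.ofList)) k with
      | nil => exact absurd hc hne
      | cons o rest => exact ⟨o, rest, rfl⟩
    have hres : pvRes (PySem.List.enumerate (lod.map PySem.Dict.ofList)) k
        = some (rest.foldl pvStep (o.1, k, o.2)) := by
      unfold pvRes; rw [hocc]
    have hget : (List.foldl (fun st jd => jd.2.items.foldl (fun st p => altStep st jd.1 p) st)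
        PySem.Dict.empty (PySem.List.enumerate (lod.map PySem.Dict.ofList))).get? k
        = some (rest.foldl pvStep (o.1, k, o.2)) := by
      rw [bMain_get? k _ hnd PySem.Dict.empty]
      have : (PySem.Dict.empty : PySem.Dict String (Int × String × Int)).get? k = none := rfl
      rw [this, hres]
    rw [PySem.Dict.getD_of_get?_eq_some _ _ hget]
    unfold pvG
    rw [hres]
  rw [hA, hB]
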